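-- pv_equiv track=rewrite | github.com/loxorez/test_repo | Homework4.py | sing_gen
-- ===== SOURCE A (Python) =====
-- def sing_gen(line_value = 3, la_value = 3, end = 0):
--     """
--     Generates and returns la-la-la song as string
--
--     :param line_value: int, how many lines to generate
--     :param la_value: int, la counts in single line
--     :param end: int, last line last symbol
--     :return: str, full song
--     """
--     full_song = ''
--     assert type(line_value) is type(la_value) is type(end) is int, "Only int type is possible as argument's value"
--     for line in range(1, line_value+1):
--         if line != line_value:
--             full_song += 'la-' * (la_value-1) + 'la\n'
--         elif line == line_value and end == 0:
--             full_song += 'la-' * (la_value-1) + 'la.'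
--         elif line == line_value and end == 1:
--             full_song += 'la-' * (la_value-1) + 'la!'
--     return full_song
-- ===== SOURCE B (Python) =====
-- def sing_gen(line_value=3, la_value=3, end=0):
--     """
--     Generates and returns la-la-la song as string (closed form: one line
--     built once, interior by string multiplication, terminator appended last).
--     """
--     assert type(line_value) is type(la_value) is type(end) is int, "Only int type is possible as argument's value"
--     if line_value < 1:
--         return ''
--     line = 'la-' * (la_value - 1) + 'la'
--     song = (line + '\n') * (line_value - 1)
--     if end == 0:
--         song += line + '.'
--     elif end == 1:
--         song += line + '!'
--     return song
-- ===== Notes on version B (the rewrite author's own statement) =====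
-- stated objective: simpler
-- what changed: Replaces A's per-iteration loop with branch chain by a closed form: the single line is built once and the interior comes from one string multiplication, with the terminator ('.', '!', or A's omission for other end values) appended in a single final step guarded by line_value >= 1.
import Mathlib
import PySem

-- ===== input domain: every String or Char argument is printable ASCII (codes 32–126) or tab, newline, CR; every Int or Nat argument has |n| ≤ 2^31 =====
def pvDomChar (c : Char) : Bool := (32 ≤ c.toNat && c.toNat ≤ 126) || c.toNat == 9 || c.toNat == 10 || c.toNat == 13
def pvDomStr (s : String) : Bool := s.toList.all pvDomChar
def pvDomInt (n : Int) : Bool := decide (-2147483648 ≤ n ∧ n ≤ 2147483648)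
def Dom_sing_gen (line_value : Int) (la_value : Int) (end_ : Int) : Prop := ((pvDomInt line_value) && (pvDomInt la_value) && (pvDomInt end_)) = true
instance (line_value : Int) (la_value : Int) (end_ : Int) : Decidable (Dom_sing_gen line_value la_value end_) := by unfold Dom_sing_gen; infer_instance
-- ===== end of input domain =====

-- B builds the song in closed form (line once, interior by repetition, terminator appended last)
-- instead of A's per-line loop with a branch chain; return values proved equal on all int inputs.

-- ===== PORT A =====
-- strings are ported as List Char (PySem convention: Lean's String ops are opaque);
-- 'la-' * n is PySem.List.pyRepeat (exact: negative n gives '')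
def sing_gen (line_value : Int) (la_value : Int) (end_ : Int) : String :=
  let full_song : List Char :=
    (PySem.List.pyRange 1 (line_value + 1) 1).foldl (fun full_song line =>
      if line ≠ line_value then
        full_song ++ (PySem.List.pyRepeat "la-".toList (la_value - 1) ++ "la\n".toList)
      else if line = line_value ∧ end_ = 0 then
        full_song ++ (PySem.List.pyRepeat "la-".toList (la_value - 1) ++ "la.".toList)
      else if line = line_value ∧ end_ = 1 then
        full_song ++ (PySem.List.pyRepeat "la-".toList (la_value - 1) ++ "la!".toList)
      else full_song) []
  String.ofList full_song

-- ===== PORT B =====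
def sing_gen_alt (line_value : Int) (la_value : Int) (end_ : Int) : String :=
  if line_value < 1 then ""
  else
    let line : List Char := PySem.List.pyRepeat "la-".toList (la_value - 1) ++ "la".toList
    let song : List Char := PySem.List.pyRepeat (line ++ "\n".toList) (line_value - 1)
    let song : List Char :=
      if end_ = 0 then song ++ (line ++ ".".toList)
      else if end_ = 1 then song ++ (line ++ "!".toList)
      else song
    String.ofList song

-- ===== PRECONDITION & SPEC =====
def Spec_sing_gen (line_value : Int) (la_value : Int) (end_ : Int) (out : String) : Prop := out = sing_gen_alt line_value la_value end_
instance (line_value : Int) (la_value : Int) (end_ : Int) (out : String) : Decidable (Spec_sing_gen line_value la_value end_ out) := by unfold Spec_sing_gen; infer_instance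

-- ===== CLAIM (what is proved, stated in full; the proofs are below) =====
def Claim_equal_sing_gen : Prop := ∀ (line_value : Int) (la_value : Int) (end_ : Int), Dom_sing_gen line_value la_value end_ → Spec_sing_gen line_value la_value end_ (sing_gen line_value la_value end_)

-- ===== LEMMAS AND PROOFS =====

-- a fold that appends the same chunk each step is that chunk repeated
theorem foldl_append_const {α β : Type} (c : List α) (l : List β) (init : List α) :
    l.foldl (fun a _ => a ++ c) init = init ++ (List.replicate l.length c).flatten := by
  induction l generalizing init with
  | nil => simp
  | cons x xs ih => simp [List.foldl_cons, ih, List.replicate_succ]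

-- ===== VERDICT (by name: the statement is the Claim_ definition above) =====
theorem sing_gen_spec : Claim_equal_sing_gen := by
  intro lv la e _
  unfold Spec_sing_gen sing_gen sing_gen_alt
  by_cases h : 1 ≤ lv
  · rw [PySem.List.pyRange_one_append 1 lv (lv + 1) h (by omega)]
    rw [PySem.List.pyRange_one_singleton]
    rw [List.foldl_append]
    rw [PySem.List.foldl_congr_mem (PySem.List.pyRange 1 lv 1) _
        (fun a (_ : Int) => a ++ (PySem.List.pyRepeat "la-".toList (la - 1) ++ "la\n".toList))
        ([] : List Char)
        (by
          intro acc x hx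
          have hx' := (PySem.List.mem_pyRange_one).1 hx
          simp [show x ≠ lv by omega])]
    rw [foldl_append_const]
    rw [if_neg (show ¬ lv < 1 by omega)]
    apply congrArg String.ofList
    have hstr : ("la\n".toList : List Char)
        = ("la".toList ++ "\n".toList : List Char) := by decide
    by_cases h0 : e = 0
    · simp [h0, hstr, PySem.List.pyRepeat, PySem.List.length_pyRange_one,
        show ("la.".toList : List Char) = "la".toList ++ ".".toList by decide]
    · by_cases h1 : e = 1
      · simp [h1, hstr, PySem.List.pyRepeat, PySem.List.length_pyRange_one,
          show ("la!".toList : List Char) = "la".toList ++ "!".toList by decide]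
      · simp [h0, h1, hstr, PySem.List.pyRepeat, PySem.List.length_pyRange_one]
  · rw [PySem.List.pyRange_one_eq_nil (by omega)]
    rw [if_pos (show lv < 1 by omega)]
    rfl
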